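-- pv_equiv track=rewrite | github.com/WinslowJosiah/receipt-printer | printer/escpos_with_software_columns.py | _repeat_last
-- ===== SOURCE A (Python) =====
-- def _repeat_last(iterable, max_iterations: int = 1000):
--     """Iterate over the items of a list repeating the last one until max_iterations."""
--     i = 0
--     while i < max_iterations:
--         try:
--             yield iterable[i]
--         except IndexError:
--             yield iterable[-1]
--         i += 1
-- ===== SOURCE B (Python) =====
-- def _repeat_last(iterable, max_iterations: int = 1000):
--     """Iterate over the items of a list repeating the last one until max_iterations."""
--     if max_iterations <= 0:
--         return
--     last = iterable[-1]
--     count = 0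
--     for item in iterable:
--         yield item
--         count += 1
--         if count == max_iterations:
--             return
--     while count < max_iterations:
--         yield last
--         count += 1
-- ===== Notes on version B (the rewrite author's own statement) =====
-- stated objective: alternative
-- what changed: A probes indices one at a time catching IndexError each step; B iterates the list once directly and then fills remaining iterations with a cached last element in a separate loop, with no exception handling in the steady state.
import Mathlib
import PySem

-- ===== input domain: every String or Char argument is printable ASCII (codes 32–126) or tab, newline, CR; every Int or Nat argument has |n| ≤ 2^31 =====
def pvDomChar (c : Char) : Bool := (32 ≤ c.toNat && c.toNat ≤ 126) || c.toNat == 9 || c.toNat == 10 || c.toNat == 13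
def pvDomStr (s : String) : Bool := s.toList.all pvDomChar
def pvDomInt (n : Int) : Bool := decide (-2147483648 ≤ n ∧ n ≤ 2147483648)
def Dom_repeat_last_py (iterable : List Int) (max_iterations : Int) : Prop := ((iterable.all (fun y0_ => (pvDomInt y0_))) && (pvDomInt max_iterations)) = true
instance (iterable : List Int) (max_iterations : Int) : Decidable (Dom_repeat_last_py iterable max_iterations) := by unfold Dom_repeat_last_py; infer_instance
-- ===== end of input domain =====

-- B restructures A's single index-probe-with-IndexError loop into a direct pass over the
-- list followed by a fill loop repeating a cached last element (objective: alternative).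
-- Generators are ported as the list of yielded values.

-- ===== PORT A =====
-- while i < max_iterations: try yield iterable[i] except IndexError: yield iterable[-1]
-- On empty iterable with max_iterations > 0 Python raises (excluded by Pre_); the port's
-- '.getD 0' default in that branch is never reached on Pre_.
def repeat_last_py (iterable : List Int) (max_iterations : Int) : List Int :=
  (PySem.List.pyRange 0 max_iterations 1).foldl
    (fun acc i =>
      acc ++ [match PySem.List.pyGet? iterable i with
              | some v => v
              | none => (PySem.List.pyGet? iterable (-1)).getD 0]) []

-- ===== PORT B =====
-- the for-loop over the iterable, stopping when the counter hits max_iterations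
def altMain (xs : List Int) (count m : Int) : List Int × Int :=
  match xs with
  | [] => ([], count)
  | x :: rest =>
      if count + 1 = m then ([x], count + 1)
      else
        let r := altMain rest (count + 1) m
        (x :: r.1, r.2)

-- the trailing 'while count < max_iterations: yield last' loop
def altFill (last count m : Int) : List Int :=
  if count < m then last :: altFill last (count + 1) m else []
termination_by (m - count).toNat
decreasing_by omega

def repeat_last_py_alt (iterable : List Int) (max_iterations : Int) : List Int :=
  if max_iterations ≤ 0 then []
  else
    match PySem.List.pyGet? iterable (-1) with
    | none => []   -- IndexError on empty input; excluded by Pre_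
    | some last =>
        let r := altMain iterable 0 max_iterations
        r.1 ++ altFill last r.2 max_iterations

-- ===== PRECONDITION & SPEC =====
-- Pre_ excludes exactly the inputs where Python A raises IndexError: an empty iterable
-- with a positive max_iterations (B raises there too).
def Pre_repeat_last_py (iterable : List Int) (max_iterations : Int) : Prop :=
  iterable ≠ [] ∨ max_iterations ≤ 0
instance (iterable : List Int) (max_iterations : Int) : Decidable (Pre_repeat_last_py iterable max_iterations) := by unfold Pre_repeat_last_py; infer_instance
def pvWitness_repeat_last_py : List Int × Int := ([3, 7], 5)
def Spec_repeat_last_py (iterable : List Int) (max_iterations : Int) (out : List Int) : Prop := out = repeat_last_py_alt iterable max_iterations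
instance (iterable : List Int) (max_iterations : Int) (out : List Int) : Decidable (Spec_repeat_last_py iterable max_iterations out) := by unfold Spec_repeat_last_py; infer_instance

-- ===== CLAIM (what is proved, stated in full; the proofs are below) =====
def Claim_equal_repeat_last_py : Prop := ∀ (iterable : List Int) (max_iterations : Int), Dom_repeat_last_py iterable max_iterations → Pre_repeat_last_py iterable max_iterations → Spec_repeat_last_py iterable max_iterations (repeat_last_py iterable max_iterations)

-- ===== LEMMAS AND PROOFS =====

-- common model of both results
def pvModel (xs : List Int) (n : Nat) (last : Int) : List Int :=
  xs.take n ++ List.replicate (n - xs.length) last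

lemma altFill_eq (last count m : Int) :
    altFill last count m = List.replicate (m - count).toNat last := by
  by_cases h : count < m
  · rw [altFill, if_pos h, altFill_eq last (count + 1) m]
    have : (m - count).toNat = (m - (count + 1)).toNat + 1 := by omega
    rw [this, List.replicate_succ]
  · rw [altFill, if_neg h]
    have : (m - count).toNat = 0 := by omega
    rw [this, List.replicate_zero]
termination_by (m - count).toNat
decreasing_by omega

lemma altMain_eq (xs : List Int) (count m : Int) (h : count < m) :
    altMain xs count m =
      (xs.take (m - count).toNat, count + min (xs.length : Int) (m - count)) := by
  induction xs generalizing count with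
  | nil => simp [altMain]; omega
  | cons x rest ih =>
      rw [altMain]
      by_cases hc : count + 1 = m
      · have h1 : (m - count).toNat = 1 := by omega
        simp [hc, h1]
        omega
      · have hlt : count + 1 < m := by omega
        rw [if_neg hc, ih (count + 1) hlt]
        have h2 : (m - count).toNat = (m - (count + 1)).toNat + 1 := by omega
        rw [h2]
        simp [List.take_succ_cons]
        omega

lemma alt_eq_model (xs : List Int) (m : Int) (hxs : xs ≠ []) :
    repeat_last_py_alt xs m = pvModel xs m.toNat (xs.getLast hxs) := by
  unfold repeat_last_py_alt
  by_cases hm : m ≤ 0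
  · have : m.toNat = 0 := by omega
    simp [hm, pvModel, this]
  · rw [if_neg hm, PySem.List.pyGet?_neg_one, List.getLast?_eq_getLast_of_ne_nil hxs]
    have hlt : (0 : Int) < m := by omega
    simp only [altMain_eq xs 0 m hlt, altFill_eq]
    unfold pvModel
    congr 1
    · congr 1; omega
    · congr 1; omega

lemma model_step (xs : List Int) (n : Nat) (last : Int) (hxs : xs ≠ [])
    (hlast : last = xs.getLast hxs) :
    pvModel xs n last ++
      [match PySem.List.pyGet? xs (n : Int) with
       | some v => v
       | none => (PySem.List.pyGet? xs (-1)).getD 0] = pvModel xs (n + 1) last := by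
  unfold pvModel
  by_cases hn : n < xs.length
  · rw [PySem.List.pyGet?_natCast, List.getElem?_eq_getElem hn]
    have h0 : n - xs.length = 0 := by omega
    have h1 : n + 1 - xs.length = 0 := by omega
    simp only [h0, h1, List.replicate_zero, List.append_nil]
    rw [List.take_add_one, List.getElem?_eq_getElem hn]
    rfl
  · have hge : xs.length ≤ n := by omega
    rw [PySem.List.pyGet?_natCast, List.getElem?_eq_none hge,
        PySem.List.pyGet?_neg_one, List.getLast?_eq_getLast_of_ne_nil hxs]
    have h1 : n + 1 - xs.length = (n - xs.length) + 1 := by omega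
    simp [List.take_of_length_le hge, List.take_of_length_le (by omega : xs.length ≤ n + 1),
          h1, hlast, List.replicate_succ']

lemma a_eq_model (xs : List Int) (n : Nat) (hxs : xs ≠ []) :
    repeat_last_py xs (n : Int) = pvModel xs n (xs.getLast hxs) := by
  induction n with
  | zero => simp [repeat_last_py, pvModel, PySem.List.pyRange_one_eq_nil]
  | succ k ih =>
      unfold repeat_last_py
      have hcast : ((k + 1 : Nat) : Int) = (k : Int) + 1 := by push_cast; ring
      rw [hcast, PySem.List.pyRange_one_succ_right (Int.natCast_nonneg k), List.foldl_append]
      unfold repeat_last_py at ih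
      rw [ih, List.foldl_cons, List.foldl_nil]
      exact model_step xs k (xs.getLast hxs) hxs rfl

-- ===== VERDICT (by name: the statement is the Claim_ definition above) =====
theorem repeat_last_py_spec : Claim_equal_repeat_last_py := by
  intro xs m _ hpre
  unfold Spec_repeat_last_py
  rcases hpre with hxs | hm
  · rw [alt_eq_model xs m hxs]
    have hm' : repeat_last_py xs m = repeat_last_py xs (m.toNat : Int) := by
      by_cases h : 0 ≤ m
      · rw [Int.toNat_of_nonneg h]
      · unfold repeat_last_py
        rw [PySem.List.pyRange_one_eq_nil (by omega),
            PySem.List.pyRange_one_eq_nil (by omega)]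
    rw [hm', a_eq_model xs m.toNat hxs]
  · have hz : m.toNat = 0 := by omega
    unfold repeat_last_py repeat_last_py_alt
    rw [PySem.List.pyRange_one_eq_nil (by omega), if_pos hm]
    rfl
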